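-- pv_equiv track=rewrite | github.com/AbdelkaderHamdi/medgemma-hackathon-project | backend/app/services/ai_service.py | _extract_report_sections
-- ===== SOURCE A (Python) =====
-- from typing import Optional, Dict, Any, List
--
-- def _extract_report_sections(report: str, report_type: str) -> Dict[str, str]:
--     """Extract sections from generated report"""
--     sections = {}
--
--     # Section headers based on report type
--     section_patterns = {
--         "soap_note": ["SUBJECTIVE", "OBJECTIVE", "ASSESSMENT", "PLAN"],
--         "progress_note": ["CHIEF COMPLAINT", "SUBJECTIVE", "OBJECTIVE", "ASSESSMENT", "PLAN"],
--         "discharge_summary": ["ADMISSION", "DISCHARGE", "REASON", "HOSPITAL COURSE", "DIAGNOSES", "MEDICATIONS", "INSTRUCTIONS"],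
--         "clinical_report": ["PRESENTATION", "FINDINGS", "ASSESSMENT", "RECOMMENDATIONS", "PLAN"]
--     }
--
--     patterns = section_patterns.get(report_type, [])
--
--     lines = report.split('\n')
--     current_section = "Header"
--     current_content = []
--
--     for line in lines:
--         line_upper = line.strip().upper()
--
--         # Check if this line starts a new section
--         is_section = any(
--             pattern in line_upper and len(line.strip()) < 100
--             for pattern in patterns
--         )
--
--         if is_section and line.strip().endswith(':'):
--             # Save previous section
--             if current_section and current_content:
--                 sections[current_section] = '\n'.join(current_content).strip()
--
--             # Start new section
--             current_section = line.strip().rstrip(':')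
--             current_content = []
--         elif current_section:
--             current_content.append(line)
--
--     # Save the last section
--     if current_section and current_content:
--         sections[current_section] = '\n'.join(current_content).strip()
--
--     return sections
-- ===== SOURCE B (Python) =====
-- def _extract_report_sections(report: str, report_type: str) -> dict:
--     """Extract sections from generated report (segment-at-a-time rewrite)."""
--     section_patterns = {
--         "soap_note": ["SUBJECTIVE", "OBJECTIVE", "ASSESSMENT", "PLAN"],
--         "progress_note": ["CHIEF COMPLAINT", "SUBJECTIVE", "OBJECTIVE", "ASSESSMENT", "PLAN"],
--         "discharge_summary": ["ADMISSION", "DISCHARGE", "REASON", "HOSPITAL COURSE", "DIAGNOSES", "MEDICATIONS", "INSTRUCTIONS"],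
--         "clinical_report": ["PRESENTATION", "FINDINGS", "ASSESSMENT", "RECOMMENDATIONS", "PLAN"]
--     }
--     patterns = section_patterns.get(report_type, [])
--
--     def is_header(line):
--         s = line.strip()
--         return s.endswith(':') and len(s) < 100 and any(p in s.upper() for p in patterns)
--
--     def split_at_header(lines):
--         for i, l in enumerate(lines):
--             if is_header(l):
--                 return lines[:i], lines[i:]
--         return lines, []
--
--     sections = {}
--     name = "Header"
--     rest = report.split('\n')
--     while True:
--         body, rest = split_at_header(rest)
--         if body:
--             sections[name] = '\n'.join(body).strip()
--         if not rest:
--             return sections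
--         name = rest[0].strip().rstrip(':')
--         rest = rest[1:]
-- ===== Notes on version B (the rewrite author's own statement) =====
-- stated objective: alternative
-- what changed: B replaces A's line-at-a-time accumulator loop (current_section/current_content state mutated per line, saved on each header hit) with a segment-at-a-time decomposition: repeatedly split the remaining lines at the next header line and store each whole segment at once.
import Mathlib
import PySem

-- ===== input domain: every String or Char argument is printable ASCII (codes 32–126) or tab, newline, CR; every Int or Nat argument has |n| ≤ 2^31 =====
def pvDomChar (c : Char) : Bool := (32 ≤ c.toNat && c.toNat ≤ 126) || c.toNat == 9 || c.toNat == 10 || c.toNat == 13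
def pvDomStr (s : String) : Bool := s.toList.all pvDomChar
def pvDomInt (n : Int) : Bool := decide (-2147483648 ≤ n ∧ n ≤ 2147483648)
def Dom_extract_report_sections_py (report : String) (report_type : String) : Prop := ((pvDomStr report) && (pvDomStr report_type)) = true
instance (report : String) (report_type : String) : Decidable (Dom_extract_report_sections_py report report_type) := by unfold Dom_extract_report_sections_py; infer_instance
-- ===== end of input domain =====

-- B replaces A's line-at-a-time accumulator loop with a segment-at-a-time decomposition
-- (repeatedly split the remaining lines at the next header line and store whole segments).

-- ===== PORT A =====

-- the literal section_patterns dict; patterns = section_patterns.get(report_type, [])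
def pvSectionPatterns : PySem.Dict String (List String) := PySem.Dict.mk
  [("soap_note", ["SUBJECTIVE", "OBJECTIVE", "ASSESSMENT", "PLAN"]),
   ("progress_note", ["CHIEF COMPLAINT", "SUBJECTIVE", "OBJECTIVE", "ASSESSMENT", "PLAN"]),
   ("discharge_summary", ["ADMISSION", "DISCHARGE", "REASON", "HOSPITAL COURSE", "DIAGNOSES", "MEDICATIONS", "INSTRUCTIONS"]),
   ("clinical_report", ["PRESENTATION", "FINDINGS", "ASSESSMENT", "RECOMMENDATIONS", "PLAN"])]

-- exact port of str.rstrip(':'): drop trailing ':' characters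
def pvRstripColon (s : String) : String :=
  String.ofList ((s.toList.reverse.dropWhile (· == ':')).reverse)

-- one iteration of A's for-loop; state = (sections, current_section, current_content)
def pvStepA (patterns : List String)
    (st : PySem.Dict String String × String × List String) (line : String) :
    PySem.Dict String String × String × List String :=
  let s := PySem.Str.strip line
  let line_upper := PySem.Str.upper s
  let is_section := patterns.any (fun p => PySem.Str.isIn p line_upper && decide (PySem.Str.len s < 100))
  if is_section && PySem.Str.endswith s ":" then
    let d := if st.2.1 ≠ "" ∧ st.2.2 ≠ [] then
               st.1.insert st.2.1 (PySem.Str.strip (PySem.Str.join "\n" st.2.2))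
             else st.1
    (d, pvRstripColon s, ([] : List String))
  else if st.2.1 ≠ "" then (st.1, st.2.1, st.2.2 ++ [line])
  else st

-- A's trailing "save the last section"
def pvFinishA (st : PySem.Dict String String × String × List String) : PySem.Dict String String :=
  if st.2.1 ≠ "" ∧ st.2.2 ≠ [] then
    st.1.insert st.2.1 (PySem.Str.strip (PySem.Str.join "\n" st.2.2))
  else st.1

def extract_report_sections_py (report : String) (report_type : String) : List (String × String) :=
  let patterns := pvSectionPatterns.getD report_type []
  let lines := (PySem.Str.split? report "\n").getD []   -- sep "\n" ≠ "", so split? is always some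
  (pvFinishA (lines.foldl (pvStepA patterns) (PySem.Dict.mk [], "Header", []))).items

-- ===== PORT B =====

-- Source B's is_header(line)
def pvIsHeader (patterns : List String) (line : String) : Bool :=
  let s := PySem.Str.strip line
  PySem.Str.endswith s ":" && decide (PySem.Str.len s < 100)
    && patterns.any (fun p => PySem.Str.isIn p (PySem.Str.upper s))

-- Source B's split_at_header: (lines before the first header, lines from the first header on)
def pvSplitAtHeader (patterns : List String) : List String → List String × List String
  | [] => ([], [])
  | l :: ls =>
    if pvIsHeader patterns l then ([], l :: ls)
    else
      let br := pvSplitAtHeader patterns ls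
      (l :: br.1, br.2)

-- needed by pvBuildB's termination argument
theorem pvSplitAtHeader_snd_le (patterns : List String) (ls : List String) :
    (pvSplitAtHeader patterns ls).2.length ≤ ls.length := by
  induction ls with
  | nil => simp [pvSplitAtHeader]
  | cons l t ih =>
    simp only [pvSplitAtHeader]
    split
    · simp
    · simpa using Nat.le_succ_of_le ih

-- Source B's while-True loop, one segment (body, then the next header) per call
def pvBuildB (patterns : List String) (sections : PySem.Dict String String)
    (name : String) (rest : List String) : PySem.Dict String String :=
  let br := pvSplitAtHeader patterns rest
  let sections' := if br.1 ≠ [] then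
                     sections.insert name (PySem.Str.strip (PySem.Str.join "\n" br.1))
                   else sections
  match h : br.2 with
  | [] => sections'
  | h0 :: t => pvBuildB patterns sections' (pvRstripColon (PySem.Str.strip h0)) t
termination_by rest.length
decreasing_by
  have := pvSplitAtHeader_snd_le patterns rest
  rw [h] at this
  simpa using Nat.lt_of_lt_of_le (Nat.lt_succ_self t.length) this

def extract_report_sections_py_alt (report : String) (report_type : String) : List (String × String) :=
  let patterns := pvSectionPatterns.getD report_type []
  let lines := (PySem.Str.split? report "\n").getD []   -- sep "\n" ≠ "", so split? is always some
  (pvBuildB patterns (PySem.Dict.mk []) "Header" lines).items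

-- ===== PRECONDITION & SPEC =====
def Spec_extract_report_sections_py (report : String) (report_type : String) (out : List (String × String)) : Prop := out = extract_report_sections_py_alt report report_type
instance (report : String) (report_type : String) (out : List (String × String)) : Decidable (Spec_extract_report_sections_py report report_type out) := by unfold Spec_extract_report_sections_py; infer_instance

-- ===== CLAIM (what is proved, stated in full; the proofs are below) =====
def Claim_equal_extract_report_sections_py : Prop := ∀ (report : String) (report_type : String), Dom_extract_report_sections_py report report_type → Spec_extract_report_sections_py report report_type (extract_report_sections_py report report_type)

-- ===== LEMMAS AND PROOFS =====

-- every pattern list the dict can yield consists of strings containing a non-':' character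
theorem pv_pat_ok (rt : String) :
    ∀ p ∈ pvSectionPatterns.getD rt [], p.toList.any (fun c => decide (c ≠ ':')) = true := by
  by_cases h1 : rt = "soap_note"
  · subst h1; decide
  by_cases h2 : rt = "progress_note"
  · subst h2; decide
  by_cases h3 : rt = "discharge_summary"
  · subst h3; decide
  by_cases h4 : rt = "clinical_report"
  · subst h4; decide
  have h1' : ("soap_note" == rt) = false := by simp; exact fun e => h1 e.symm
  have h2' : ("progress_note" == rt) = false := by simp; exact fun e => h2 e.symm
  have h3' : ("discharge_summary" == rt) = false := by simp; exact fun e => h3 e.symm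
  have h4' : ("clinical_report" == rt) = false := by simp; exact fun e => h4 e.symm
  simp [pvSectionPatterns, PySem.Dict.getD, PySem.Dict.get?, List.find?, h1', h2', h3', h4']

theorem pv_any_and_right {α : Type} (l : List α) (f : α → Bool) (c : Bool) :
    l.any (fun p => f p && c) = (l.any f && c) := by
  cases c <;> simp

-- A's "is_section and line.strip().endswith(':')" test is Source B's is_header
theorem pv_cond_eq (patterns : List String) (line : String) :
    (patterns.any (fun p => PySem.Str.isIn p (PySem.Str.upper (PySem.Str.strip line))
        && decide (PySem.Str.len (PySem.Str.strip line) < 100))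
      && PySem.Str.endswith (PySem.Str.strip line) ":") = pvIsHeader patterns line := by
  simp only [pvIsHeader, pv_any_and_right]
  cases patterns.any (fun p => PySem.Str.isIn p (PySem.Str.upper (PySem.Str.strip line))) <;>
    cases PySem.Str.endswith (PySem.Str.strip line) ":" <;>
    cases decide (PySem.Str.len (PySem.Str.strip line) < 100) <;> rfl

-- a header line's cleaned name is never the empty string
theorem pv_headerName_ne (patterns : List String) (line : String)
    (hpat : ∀ p ∈ patterns, p.toList.any (fun c => decide (c ≠ ':')) = true)
    (hH : pvIsHeader patterns line = true) :
    pvRstripColon (PySem.Str.strip line) ≠ "" := by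
  intro hemp
  have hcs : (( (PySem.Str.strip line).toList.reverse.dropWhile (· == ':')).reverse) = [] := by
    have := congrArg String.toList hemp
    simpa [pvRstripColon] using this
  have hall : ∀ x ∈ (PySem.Str.strip line).toList, x = ':' := by
    have h2 : List.dropWhile (fun x => x == ':') (PySem.Str.strip line).toList.reverse = [] := by
      simpa using congrArg List.reverse hcs
    intro x hx
    have := List.dropWhile_eq_nil_iff.mp h2 x (by simpa using hx)
    simpa using this
  simp only [pvIsHeader, Bool.and_eq_true, List.any_eq_true] at hH
  obtain ⟨⟨_, _⟩, p, hp, hin⟩ := hH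
  have hinf := (PySem.Str.isIn_iff_infix _ _).mp hin
  rw [PySem.Str.toList_upper] at hinf
  obtain ⟨c, hc, hcne⟩ := List.any_eq_true.mp (hpat p hp)
  have hcmem : c ∈ PySem.Chars.upper (PySem.Str.strip line).toList := hinf.subset hc
  simp only [PySem.Chars.upper, List.mem_map] at hcmem
  obtain ⟨x, hx, hxc⟩ := hcmem
  have : x = ':' := hall x hx
  subst this
  rw [← hxc] at hcne
  exact absurd hcne (by decide)

-- loop invariant: A's fold-then-save equals B's segment recursion, with acc the pending body
theorem pv_main (patterns : List String)
    (hpat : ∀ p ∈ patterns, p.toList.any (fun c => decide (c ≠ ':')) = true) :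
    ∀ (ls : List String) (d : PySem.Dict String String) (cur : String) (acc : List String),
      cur ≠ "" →
      pvFinishA (ls.foldl (pvStepA patterns) (d, cur, acc)) =
        (let br := pvSplitAtHeader patterns ls
         let d' := if acc ++ br.1 ≠ [] then
                     d.insert cur (PySem.Str.strip (PySem.Str.join "\n" (acc ++ br.1)))
                   else d
         match br.2 with
         | [] => d'
         | h0 :: t => pvBuildB patterns d' (pvRstripColon (PySem.Str.strip h0)) t) := by
  intro ls
  induction ls with
  | nil =>
    intro d cur acc hcur
    simp only [List.foldl_nil, pvSplitAtHeader, pvFinishA, List.append_nil]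
    simp [hcur]
  | cons l t ih =>
    intro d cur acc hcur
    by_cases hH : pvIsHeader patterns l = true
    · -- header line: A saves and resets; B closes the current segment here too
      have hstep : pvStepA patterns (d, cur, acc) l =
          ((if cur ≠ "" ∧ acc ≠ [] then
              d.insert cur (PySem.Str.strip (PySem.Str.join "\n" acc)) else d),
           pvRstripColon (PySem.Str.strip l), ([] : List String)) := by
        simp only [pvStepA, pv_cond_eq, hH]
        simp
      rw [List.foldl_cons, hstep,
        ih _ _ _ (pv_headerName_ne patterns l hpat hH)]
      have hsplit : pvSplitAtHeader patterns (l :: t) = ([], l :: t) := by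
        simp [pvSplitAtHeader, hH]
      rw [hsplit]
      simp only []
      conv_rhs => rw [pvBuildB.eq_def]
      simp [hcur]
      rcases hsnd : (pvSplitAtHeader patterns t).2 with _ | ⟨h0, t1⟩ <;> simp [hsnd]
    · -- body line: both sides extend the pending body with l
      have hH' : pvIsHeader patterns l = false := by simpa using hH
      have hstep : pvStepA patterns (d, cur, acc) l = (d, cur, acc ++ [l]) := by
        simp only [pvStepA, pv_cond_eq, hH']
        simp [hcur]
      have hsplit : pvSplitAtHeader patterns (l :: t) =
          (l :: (pvSplitAtHeader patterns t).1, (pvSplitAtHeader patterns t).2) := by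
        simp [pvSplitAtHeader, hH']
      rw [List.foldl_cons, hstep, ih _ _ _ hcur, hsplit]
      simp

-- ===== VERDICT (by name: the statement is the Claim_ definition above) =====
theorem extract_report_sections_py_spec : Claim_equal_extract_report_sections_py := by
  intro report report_type _
  show _ = _
  unfold extract_report_sections_py extract_report_sections_py_alt
  show (pvFinishA (List.foldl (pvStepA (pvSectionPatterns.getD report_type []))
      (PySem.Dict.mk [], "Header", []) ((PySem.Str.split? report "\n").getD []))).items =
    (pvBuildB (pvSectionPatterns.getD report_type []) (PySem.Dict.mk []) "Header"
      ((PySem.Str.split? report "\n").getD [])).items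
  congr 1
  rw [pv_main (pvSectionPatterns.getD report_type []) (pv_pat_ok report_type)
      ((PySem.Str.split? report "\n").getD []) (PySem.Dict.mk []) "Header" [] (by decide)]
  conv_rhs => rw [pvBuildB.eq_def]
  simp
  rcases hsnd : (pvSplitAtHeader (pvSectionPatterns.getD report_type [])
      ((PySem.Str.split? report "\n").getD [])).2 with _ | ⟨h0, t1⟩ <;> simp [hsnd]
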